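-- pv_equiv track=rewrite | github.com/Sanielia/DiamentBitMatura | ciagi_zadanie/8.py | have_same_number_of_ones_in_binary
-- ===== SOURCE A (Python) =====
-- def have_same_number_of_ones_in_binary(a: int, b: int) -> bool:
--     a_bin = str(bin(a))
--     b_bin = str(bin(b))
--     len_a_bin = len(a_bin)
--     len_b_bin = len(b_bin)
--     smaller = b_bin
--     smaller_length = len_b_bin
--     longer = a_bin
--     length = len_a_bin
--     if len_b_bin > len_a_bin:
--         smaller = a_bin
--         smaller_length = len_a_bin
--         longer = b_bin
--         length = len_b_bin
--
--     count = 0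
--     for i in range(length):
--         if i < smaller_length:
--             if smaller[i] == "1":
--                 count -= 1
--         if longer[i] == "1":
--             count += 1
--
--     return count == 0
-- ===== SOURCE B (Python) =====
-- def _popcount(n: int) -> int:
--     # Kernighan: clear the lowest set bit until zero
--     n = abs(n)
--     c = 0
--     while n:
--         n &= n - 1
--         c += 1
--     return c
--
--
-- def have_same_number_of_ones_in_binary(a: int, b: int) -> bool:
--     return _popcount(a) == _popcount(b)
-- ===== Notes on version B (the rewrite author's own statement) =====
-- stated objective: alternative
-- what changed: B computes each operand's popcount with Kernighan's clear-lowest-set-bit loop on abs(n) and compares the two counts, instead of building bin() strings and scanning their characters with an index loop over the longer string.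
import Mathlib
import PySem

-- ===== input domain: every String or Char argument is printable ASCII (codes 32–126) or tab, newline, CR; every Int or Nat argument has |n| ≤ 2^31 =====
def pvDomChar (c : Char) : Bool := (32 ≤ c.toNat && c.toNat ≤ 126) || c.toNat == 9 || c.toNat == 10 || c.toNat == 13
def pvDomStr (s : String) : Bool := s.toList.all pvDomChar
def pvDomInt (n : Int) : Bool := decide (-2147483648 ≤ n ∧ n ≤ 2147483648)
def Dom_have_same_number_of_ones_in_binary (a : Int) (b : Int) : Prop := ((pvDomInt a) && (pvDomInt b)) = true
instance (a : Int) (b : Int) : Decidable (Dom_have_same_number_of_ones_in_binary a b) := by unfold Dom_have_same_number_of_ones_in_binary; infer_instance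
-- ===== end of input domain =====

-- B replaces A's scan over the characters of bin() strings by Kernighan's
-- clear-lowest-set-bit popcount loop on |n| and compares the two counts (alternative algorithm).


-- ===== PORT A =====
-- binary digits of a Nat, most significant first (empty for 0)
def pvDigits (n : Nat) : List Char :=
  if n = 0 then []
  else pvDigits (n / 2) ++ [if n % 2 = 1 then '1' else '0']

-- Python's bin(n) as a list of characters ('-0b…' for negatives, '0b0' for 0)
def pvBin (n : Int) : List Char :=
  if n < 0 then '-' :: '0' :: 'b' :: pvDigits n.natAbs
  else if n = 0 then ['0', 'b', '0']
  else '0' :: 'b' :: pvDigits n.natAbs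

def have_same_number_of_ones_in_binary (a : Int) (b : Int) : Bool :=
  let a_bin := pvBin a
  let b_bin := pvBin b
  let len_a_bin : Int := a_bin.length
  let len_b_bin : Int := b_bin.length
  let sl := if len_b_bin > len_a_bin then (a_bin, len_a_bin, b_bin, len_b_bin)
            else (b_bin, len_b_bin, a_bin, len_a_bin)
  let smaller := sl.1
  let smaller_length := sl.2.1
  let longer := sl.2.2.1
  let length := sl.2.2.2
  let count : Int :=
    (PySem.List.pyRange 0 length 1).foldl
      (fun count i =>
        let count := if i < smaller_length then
                       (if PySem.List.pyGetD smaller i ' ' = '1' then count - 1 else count)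
                     else count
        if PySem.List.pyGetD longer i ' ' = '1' then count + 1 else count)
      0
  count == 0

-- ===== PORT B =====
-- Kernighan popcount: while n: n &= n - 1; c += 1
def pvPopK (n : Nat) : Nat :=
  if n = 0 then 0
  else pvPopK (n &&& (n - 1)) + 1
decreasing_by
  have h1 : n &&& (n - 1) ≤ n - 1 := Nat.and_le_right
  omega

def have_same_number_of_ones_in_binary_alt (a : Int) (b : Int) : Bool :=
  pvPopK a.natAbs == pvPopK b.natAbs

-- ===== PRECONDITION & SPEC =====
def Spec_have_same_number_of_ones_in_binary (a : Int) (b : Int) (out : Bool) : Prop := out = have_same_number_of_ones_in_binary_alt a b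
instance (a : Int) (b : Int) (out : Bool) : Decidable (Spec_have_same_number_of_ones_in_binary a b out) := by unfold Spec_have_same_number_of_ones_in_binary; infer_instance

-- ===== CLAIM (what is proved, stated in full; the proofs are below) =====
def Claim_equal_have_same_number_of_ones_in_binary : Prop := ∀ (a : Int) (b : Int), Dom_have_same_number_of_ones_in_binary a b → Spec_have_same_number_of_ones_in_binary a b (have_same_number_of_ones_in_binary a b)

-- ===== LEMMAS AND PROOFS =====

-- bit identities used to unwind Kernighan's step
theorem pv_and_oe (a b : Nat) : (2*a+1) &&& (2*b) = 2*(a &&& b) := by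
  apply Nat.eq_of_testBit_eq
  intro i
  cases i with
  | zero => simp [Nat.testBit_zero]
  | succ j =>
    have h1 : (2*a+1)/2 = a := by omega
    have h2 : (2*b)/2 = b := by omega
    have h3 : (2*(a &&& b))/2 = a &&& b := by omega
    simp [Nat.testBit_and, Nat.testBit_succ, Nat.and_div_two, h1, h2, h3]

theorem pv_and_eo (a b : Nat) : (2*a) &&& (2*b+1) = 2*(a &&& b) := by
  apply Nat.eq_of_testBit_eq
  intro i
  cases i with
  | zero => simp [Nat.testBit_zero]
  | succ j =>
    have h1 : (2*a)/2 = a := by omega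
    have h2 : (2*b+1)/2 = b := by omega
    have h3 : (2*(a &&& b))/2 = a &&& b := by omega
    simp [Nat.testBit_and, Nat.testBit_succ, Nat.and_div_two, h1, h2, h3]

-- Kernighan count ignores a trailing zero bit
theorem pvPopK_double (m : Nat) : pvPopK (2*m) = pvPopK m := by
  induction m using Nat.strong_induction_on with
  | _ m ih =>
    cases Nat.eq_zero_or_pos m with
    | inl h0 => subst h0; rfl
    | inr hpos =>
      have h2m : 2*m ≠ 0 := by omega
      have hm : m ≠ 0 := by omega
      have hstep : (2*m) &&& (2*m - 1) = 2 * (m &&& (m-1)) := by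
        have : 2*m - 1 = 2*(m-1)+1 := by omega
        rw [this, pv_and_eo]
      have hlt : m &&& (m-1) < m := by
        have := Nat.and_le_right (n := m) (m := m-1)
        omega
      rw [pvPopK, if_neg h2m, hstep, ih _ hlt]
      conv_rhs => rw [pvPopK, if_neg hm]

-- Kernighan count = PySem's bit_count
theorem pvPopK_eq_bitCount (n : Nat) : pvPopK n = PySem.Int.bitCount (n : Int) := by
  induction n using Nat.strong_induction_on with
  | _ n ih =>
    cases Nat.eq_zero_or_pos n with
    | inl h0 => subst h0; simp [pvPopK, PySem.Int.bitCount_zero]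
    | inr hpos =>
      have hn : n ≠ 0 := by omega
      rw [PySem.Int.bitCount_natCast hpos]
      rcases Nat.even_or_odd n with he | ho
      · obtain ⟨m, hm⟩ := he
        have hmne : m ≠ 0 := by omega
        have hrw : n = 2*m := by omega
        subst hrw
        have hdiv : 2*m/2 = m := by omega
        rw [pvPopK_double, hdiv, ih m (by omega)]
        omega
      · obtain ⟨m, hm⟩ := ho
        subst hm
        have hne : 2*m+1 ≠ 0 := by omega
        rw [pvPopK, if_neg hne]
        have hstep : (2*m+1) &&& (2*m+1-1) = 2*m := by
          have h1 : 2*m+1-1 = 2*m := by omega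
          rw [h1, pv_and_oe, Nat.and_self]
        rw [hstep, pvPopK_double, ih m (by omega)]
        have hdiv : (2*m+1)/2 = m := by omega
        have hmod : (2*m+1)%2 = 1 := by omega
        rw [hdiv, hmod]
        omega

-- number of '1' characters in the digit list = bit_count
theorem pv_count_digits (n : Nat) : (pvDigits n).count '1' = PySem.Int.bitCount (n : Int) := by
  induction n using Nat.strong_induction_on with
  | _ n ih =>
    cases Nat.eq_zero_or_pos n with
    | inl h0 => subst h0; simp [pvDigits, PySem.Int.bitCount_zero]
    | inr hpos =>
      have hn : n ≠ 0 := by omega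
      rw [pvDigits, if_neg hn, PySem.Int.bitCount_natCast hpos]
      rw [List.count_append, ih (n/2) (by omega)]
      rcases Nat.mod_two_eq_zero_or_one n with h | h <;> simp [h]; omega

-- number of '1' characters in bin(n) = bit_count of n
theorem pv_count_bin (n : Int) : (pvBin n).count '1' = PySem.Int.bitCount n := by
  unfold pvBin
  split_ifs with h1 h2
  · have : n = -(n.natAbs : Int) := by omega
    rw [this, PySem.Int.bitCount_neg]
    simp [pv_count_digits]
  · subst h2; simp [PySem.Int.bitCount_zero]
  · have : n = (n.natAbs : Int) := by omega
    rw [this]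
    simp [pv_count_digits]

-- the indexed loop computes ones(longer prefix) - ones(smaller prefix)
theorem pv_loop_count (s l : List Char) (L : Nat) (hL : L ≤ l.length) :
    (PySem.List.pyRange 0 (L : Int) 1).foldl
      (fun count i =>
        let count := if i < (s.length : Int) then
                       (if PySem.List.pyGetD s i ' ' = '1' then count - 1 else count)
                     else count
        if PySem.List.pyGetD l i ' ' = '1' then count + 1 else count)
      0
    = ((l.take L).count '1' : Int) - ((s.take L).count '1' : Int) := by
  induction L with
  | zero => simp
  | succ k ih =>
    have hk : k ≤ l.length := by omega
    have hkl : k < l.length := by omega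
    have hsplit : PySem.List.pyRange 0 ((k+1 : Nat) : Int) 1
        = PySem.List.pyRange 0 (k : Int) 1 ++ [(k : Int)] := by
      have : ((k+1 : Nat) : Int) = (k : Int) + 1 := by push_cast; ring
      rw [this, PySem.List.pyRange_one_succ_right (by positivity)]
    rw [hsplit, List.foldl_append, ih hk]
    simp only [List.foldl_cons, List.foldl_nil]
    have hlget : PySem.List.pyGetD l (k : Int) ' ' = l[k] := by
      rw [PySem.List.pyGetD_natCast]
      exact List.getD_eq_getElem l ' ' hkl
    have htakel : (l.take (k+1)).count '1'
        = (l.take k).count '1' + (if l[k] = '1' then 1 else 0) := by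
      rw [List.take_add_one, List.count_append]
      simp [List.getElem?_eq_getElem hkl, List.count_singleton]
    by_cases hs : k < s.length
    · have hsg : PySem.List.pyGetD s (k : Int) ' ' = s[k] := by
        rw [PySem.List.pyGetD_natCast]
        exact List.getD_eq_getElem s ' ' hs
      have htakes : (s.take (k+1)).count '1'
          = (s.take k).count '1' + (if s[k] = '1' then 1 else 0) := by
        rw [List.take_add_one, List.count_append]
        simp [List.getElem?_eq_getElem hs, List.count_singleton]
      have hks : (k : Int) < (s.length : Int) := by exact_mod_cast hs
      simp only [hsg, hlget, htakel, htakes]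
      split_ifs <;> push_cast at * <;> omega
    · have htakes : s.take (k+1) = s.take k := by
        rw [List.take_of_length_le (by omega), List.take_of_length_le (by omega)]
      have hks : ¬ ((k : Int) < (s.length : Int)) := by exact_mod_cast hs
      simp only [hlget, htakel, htakes]
      split_ifs <;> push_cast at * <;> omega

-- A's result is the comparison of the two '1'-counts of the bin strings
theorem pvA_eq_counts (a b : Int) :
    have_same_number_of_ones_in_binary a b
      = (((pvBin a).count '1' : Int) == ((pvBin b).count '1' : Int)) := by
  unfold have_same_number_of_ones_in_binary
  by_cases h : ((pvBin b).length : Int) > ((pvBin a).length : Int)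
  · have hlen : (pvBin a).length ≤ (pvBin b).length := by exact_mod_cast h.le
    simp only [h, if_pos]
    rw [pv_loop_count (pvBin a) (pvBin b) (pvBin b).length le_rfl]
    rw [List.take_length, List.take_of_length_le hlen]
    simp [sub_eq_zero, eq_comm]
  · simp only [h, if_false]
    rw [pv_loop_count (pvBin b) (pvBin a) (pvBin a).length le_rfl]
    have hlen : (pvBin b).length ≤ (pvBin a).length := by
      have : ¬ ((pvBin a).length < (pvBin b).length) := by exact_mod_cast h
      omega
    rw [List.take_length, List.take_of_length_le hlen]
    simp [sub_eq_zero]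

-- ===== VERDICT (by name: the statement is the Claim_ definition above) =====
theorem have_same_number_of_ones_in_binary_spec : Claim_equal_have_same_number_of_ones_in_binary := by
  intro a b _
  unfold Spec_have_same_number_of_ones_in_binary
  rw [pvA_eq_counts]
  unfold have_same_number_of_ones_in_binary_alt
  rw [pvPopK_eq_bitCount, pvPopK_eq_bitCount]
  have ha : PySem.Int.bitCount (a.natAbs : Int) = PySem.Int.bitCount a := by
    rcases Int.natAbs_eq a with h | h
    · rw [← h]
    · conv_rhs => rw [h]
      rw [PySem.Int.bitCount_neg]
  have hb : PySem.Int.bitCount (b.natAbs : Int) = PySem.Int.bitCount b := by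
    rcases Int.natAbs_eq b with h | h
    · rw [← h]
    · conv_rhs => rw [h]
      rw [PySem.Int.bitCount_neg]
  rw [ha, hb, pv_count_bin, pv_count_bin]
  simp
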